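-- pv_equiv track=rewrite | github.com/GundalaNikhil/DSA | dsa-problems/LinkedLists/testcases/tc_generators/generate_lnk005.py | solve
-- ===== SOURCE A (Python) =====
-- class ListNode:
--     def __init__(self, val=0):
--         self.val = val
--         self.next = None
--
-- def alternating_reverse(head: ListNode, l: int, k: int) -> ListNode:
--     """Alternating reverse: reverse k, skip k, repeat from position l"""
--     if not head or k <= 1:
--         return head
--
--     dummy = ListNode(0)
--     dummy.next = head
--     prev = dummy
--
--     # Move to start position l
--     for _ in range(l - 1):
--         if not prev.next:
--             return head
--         prev = prev.next
--
--     reverse_turn = True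
--
--     while prev.next:
--         if reverse_turn:
--             # Reverse next k nodes
--             tail = prev.next
--             curr = tail.next
--             count = 1
--             while curr and count < k:
--                 temp = curr.next
--                 curr.next = prev.next
--                 prev.next = curr
--                 tail.next = temp
--                 curr = temp
--                 count += 1
--             prev = tail # Move prev to end of reversed block
--         else:
--             # Skip k nodes
--             count = 0
--             while prev.next and count < k:
--                 prev = prev.next
--                 count += 1
--
--         reverse_turn = not reverse_turn
--
--     return dummy.next
--
-- def list_to_array(head):
--     result = []
--     while head:
--         result.append(head.val)
--         head = head.next
--     return result
--
-- def solve(values, l, k):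
--     if not values:
--         return []
--     dummy = ListNode()
--     cur = dummy
--     for v in values:
--         cur.next = ListNode(v)
--         cur = cur.next
--     head = alternating_reverse(dummy.next, l, k)
--     return list_to_array(head)
-- ===== SOURCE B (Python) =====
-- def solve(values, l, k):
--     if k <= 1 or not values:
--         return list(values)
--     skip = max(l - 1, 0)
--     res = list(values[:skip])
--     rev = True
--     for i in range(skip, len(values), k):
--         block = values[i:i + k]
--         res.extend(block[::-1] if rev else block)
--         rev = not rev
--     return res
-- ===== Notes on version B (the rewrite author's own statement) =====
-- stated objective: simpler
-- what changed: B drops the ListNode construction and pointer surgery entirely: it computes the same result by slicing the input list into k-blocks from position max(l-1,0) and concatenating each block reversed or as-is on alternating turns.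
import Mathlib
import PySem

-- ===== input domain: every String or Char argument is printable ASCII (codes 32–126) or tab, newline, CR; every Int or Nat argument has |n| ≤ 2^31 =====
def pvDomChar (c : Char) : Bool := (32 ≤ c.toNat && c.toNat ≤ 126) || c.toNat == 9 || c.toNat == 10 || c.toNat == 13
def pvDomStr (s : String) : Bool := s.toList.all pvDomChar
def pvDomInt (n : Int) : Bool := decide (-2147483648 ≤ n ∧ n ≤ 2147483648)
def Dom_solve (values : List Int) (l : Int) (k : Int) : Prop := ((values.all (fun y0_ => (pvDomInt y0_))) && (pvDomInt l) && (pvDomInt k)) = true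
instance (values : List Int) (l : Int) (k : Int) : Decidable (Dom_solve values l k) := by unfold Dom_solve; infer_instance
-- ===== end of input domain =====

-- B replaces A's linked-list construction and in-place pointer reversal by slicing the input
-- list into k-blocks and concatenating them reversed / unreversed on alternating turns (simpler).


-- ===== PORT A =====
-- The linked list built from `values` is modelled as the List Int of its node values; the
-- pointer surgery of A's loops becomes the corresponding state transformation on that list.

-- `for v in values: cur.next = ListNode(v); cur = cur.next` (appends one node per step)
def buildList (values : List Int) : List Int :=
  values.foldl (fun acc v => acc ++ [v]) []

-- `for _ in range(l - 1): if not prev.next: return head; prev = prev.next`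
-- state: (nodes before prev inclusive, nodes after prev); none = early `return head`
def advanceLoop : Nat → List Int → List Int → Option (List Int × List Int)
  | 0, pre, rest => some (pre, rest)
  | _ + 1, _, [] => none
  | n + 1, pre, x :: xs => advanceLoop n (pre ++ [x]) xs

-- inner `while curr and count < k` of the reverse turn: each step moves node `c` to the
-- front of the block after prev; state: (block after prev, rest after tail)
def revInner (k : Int) : List Int → List Int → Int → List Int × List Int
  | front, [], _ => (front, [])
  | front, c :: cs, count =>
    if count < k then revInner k (c :: front) cs (count + 1) else (front, c :: cs)

-- inner `while prev.next and count < k` of the skip turn: prev walks over k nodes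
def skipInner (k : Int) : List Int → List Int → Int → List Int × List Int
  | acc, [], _ => (acc, [])
  | acc, x :: xs, count =>
    if count < k then skipInner k (acc ++ [x]) xs (count + 1) else (acc, x :: xs)

-- `while prev.next:` — fuel makes the recursion total; called with fuel = rest.length,
-- enough since each iteration consumes at least one node when 2 ≤ k (the only reachable case)
def mainLoop (k : Int) : Nat → Bool → List Int → List Int → List Int
  | 0, _, acc, _ => acc
  | _, _, acc, [] => acc
  | fuel + 1, turn, acc, t :: cs =>
    if turn then
      let p := revInner k [t] cs 1
      mainLoop k fuel false (acc ++ p.1) p.2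
    else
      let p := skipInner k acc (t :: cs) 0
      mainLoop k fuel true p.1 p.2

def alternatingReverse (head : List Int) (l : Int) (k : Int) : List Int :=
  if head = [] ∨ k ≤ 1 then head
  else
    match advanceLoop (l - 1).toNat [] head with
    | none => head
    | some (pre, rest) => mainLoop k rest.length true pre rest

-- `while head: result.append(head.val); head = head.next`
def listToArray : List Int → List Int → List Int
  | acc, [] => acc
  | acc, x :: xs => listToArray (acc ++ [x]) xs

def solve (values : List Int) (l : Int) (k : Int) : List Int :=
  if values = [] then []
  else listToArray [] (alternatingReverse (buildList values) l k)

-- ===== PORT B =====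
def solve_alt (values : List Int) (l : Int) (k : Int) : List Int :=
  if k ≤ 1 ∨ values = [] then values
  else
    let skip := max (l - 1) 0
    ((PySem.List.pyRange skip (values.length : Int) k).foldl
      (fun (st : List Int × Bool) i =>
        let block := PySem.List.slice values (some i) (some (i + k))
        (st.1 ++ (if st.2 then block.reverse else block), !st.2))
      (PySem.List.slice values none (some skip), true)).1

-- ===== PRECONDITION & SPEC =====
def Spec_solve (values : List Int) (l : Int) (k : Int) (out : List Int) : Prop := out = solve_alt values l k
instance (values : List Int) (l : Int) (k : Int) (out : List Int) : Decidable (Spec_solve values l k out) := by unfold Spec_solve; infer_instance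

-- ===== CLAIM (what is proved, stated in full; the proofs are below) =====
def Claim_equal_solve : Prop := ∀ (values : List Int) (l : Int) (k : Int), Dom_solve values l k → Spec_solve values l k (solve values l k)

-- ===== LEMMAS AND PROOFS =====

theorem buildList_eq (values : List Int) : buildList values = values := by
  simpa [buildList] using PySem.List.foldl_append_singleton values []

theorem listToArray_eq (acc xs : List Int) : listToArray acc xs = acc ++ xs := by
  induction xs generalizing acc with
  | nil => simp [listToArray]
  | cons x xs ih => simp [listToArray, ih]

theorem advanceLoop_eq (n : Nat) (pre rest : List Int) :
    advanceLoop n pre rest =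
      if n ≤ rest.length then some (pre ++ rest.take n, rest.drop n) else none := by
  induction n generalizing pre rest with
  | zero => simp [advanceLoop]
  | succ n ih =>
    cases rest with
    | nil => simp [advanceLoop]
    | cons x xs => simp [advanceLoop, ih]

theorem revInner_eq (k : Int) (front curr : List Int) (count : Int) :
    revInner k front curr count =
      ((curr.take (k - count).toNat).reverse ++ front, curr.drop (k - count).toNat) := by
  induction curr generalizing front count with
  | nil => simp [revInner]
  | cons c cs ih =>
    by_cases h : count < k
    · have ht : (k - count).toNat = (k - (count + 1)).toNat + 1 := by omega
      simp [revInner, h, ih, ht]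
    · have ht : (k - count).toNat = 0 := by omega
      simp [revInner, h, ht]

theorem skipInner_eq (k : Int) (acc rest : List Int) (count : Int) :
    skipInner k acc rest count =
      (acc ++ rest.take (k - count).toNat, rest.drop (k - count).toNat) := by
  induction rest generalizing acc count with
  | nil => simp [skipInner]
  | cons x xs ih =>
    by_cases h : count < k
    · have ht : (k - count).toNat = (k - (count + 1)).toNat + 1 := by omega
      simp [skipInner, h, ih, ht]
    · have ht : (k - count).toNat = 0 := by omega
      simp [skipInner, h, ht]

theorem pyRange_pos_eq_nil (a b s : Int) (hs : 0 < s) (h : b ≤ a) :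
    PySem.List.pyRange a b s = [] := by
  rw [PySem.List.pyRange_of_pos a b hs]
  simp [show ¬ a < b by omega]

theorem pyRange_pos_cons (a b s : Int) (hs : 0 < s) (h : a < b) :
    PySem.List.pyRange a b s = a :: PySem.List.pyRange (a + s) b s := by
  rw [PySem.List.pyRange_of_pos a b hs, PySem.List.pyRange_of_pos (a + s) b hs]
  by_cases h2 : a + s < b
  · have hdiv : (b - a + s - 1) / s = (b - (a + s) + s - 1) / s + 1 := by
      have he : b - a + s - 1 = (b - (a + s) + s - 1) + 1 * s := by ring
      rw [he, Int.add_mul_ediv_right _ _ (by omega : s ≠ 0)]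
    have hn : ((b - a + s - 1) / s).toNat = ((b - (a + s) + s - 1) / s).toNat + 1 := by
      have h1 : 0 ≤ (b - (a + s) + s - 1) / s := Int.ediv_nonneg (by omega) (by omega)
      omega
    rw [if_pos h, if_pos h2, hn, List.range_succ_eq_map, List.map_cons, List.map_map]
    congr 1
    · push_cast; ring
    · apply List.map_congr_left
      intro x _
      simp only [Function.comp_apply]
      push_cast
      ring
  · have hge1 : 1 ≤ (b - a + s - 1) / s := by
      rw [Int.le_ediv_iff_mul_le hs]; omega
    have hlt2 : (b - a + s - 1) / s < 2 := by
      rw [Int.ediv_lt_iff_lt_mul hs]; omega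
    have hdiv : (b - a + s - 1) / s = 1 := by omega
    simp [if_pos h, if_neg h2, hdiv, List.range_succ]

-- the foldl B performs, starting at index i, seen from A's main loop on the suffix values.drop i
theorem mainLoop_eq_foldl (values : List Int) (k : Int) (hk : 2 ≤ k) :
    ∀ (fuel : Nat) (i : Int) (turn : Bool) (acc : List Int), 0 ≤ i →
      (values.drop i.toNat).length ≤ fuel →
      mainLoop k fuel turn acc (values.drop i.toNat) =
        ((PySem.List.pyRange i (values.length : Int) k).foldl
          (fun (st : List Int × Bool) j =>
            let block := PySem.List.slice values (some j) (some (j + k))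
            (st.1 ++ (if st.2 then block.reverse else block), !st.2))
          (acc, turn)).1 := by
  intro fuel
  induction fuel with
  | zero =>
    intro i turn acc hi hlen
    have hnil : values.drop i.toNat = [] := List.eq_nil_of_length_eq_zero (by omega)
    have hl0 : values.length - i.toNat = 0 := by
      have := congrArg List.length hnil; simpa using this
    have hge : (values.length : Int) ≤ i := by omega
    rw [pyRange_pos_eq_nil _ _ _ (by omega) hge]
    simp [mainLoop]
  | succ fuel ih =>
    intro i turn acc hi hlen
    have hlen2 : values.length - i.toNat ≤ fuel + 1 := by simpa using hlen
    rcases hrest : values.drop i.toNat with _ | ⟨t, cs⟩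
    · have hl0 : values.length - i.toNat = 0 := by
        have := congrArg List.length hrest; simpa using this
      have hge : (values.length : Int) ≤ i := by omega
      rw [pyRange_pos_eq_nil _ _ _ (by omega) hge]
      simp [mainLoop]
    · have hlc : values.length - i.toNat = cs.length + 1 := by
        have := congrArg List.length hrest; simpa using this
      have hlt : i < (values.length : Int) := by omega
      have hcs : cs.length ≤ fuel := by omega
      rw [pyRange_pos_cons _ _ _ (by omega) hlt, List.foldl_cons]
      have hblock : PySem.List.slice values (some i) (some (i + k)) = (t :: cs).take k.toNat := by
        rw [PySem.List.slice_toNat values hi (by omega), ← hrest]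
        congr 1
        omega
      have hik : (i + k).toNat = i.toNat + k.toNat := by omega
      have hdropik : values.drop (i + k).toNat = cs.drop (k.toNat - 1) := by
        rw [hik, ← List.drop_drop, hrest]
        have hko : k.toNat = (k.toNat - 1) + 1 := by omega
        rw [hko]
        simp
      have htake : ((t :: cs).take k.toNat) = t :: cs.take (k.toNat - 1) := by
        have hko : k.toNat = (k.toNat - 1) + 1 := by omega
        rw [hko]; simp
      have hlen' : (values.drop (i + k).toNat).length ≤ fuel := by
        rw [hdropik]; simp; omega
      cases turn with
      | true =>
        have key := ih (i + k) false (acc ++ ((cs.take (k.toNat - 1)).reverse ++ [t]))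
          (by omega) hlen'
        rw [hdropik] at key
        have h1 : (k - 1).toNat = k.toNat - 1 := by omega
        simp only [mainLoop, if_true, revInner_eq, h1]
        rw [key, hblock, htake]
        simp
      | false =>
        have key := ih (i + k) true (acc ++ (t :: cs).take k.toNat) (by omega) hlen'
        rw [hdropik] at key
        have hd : (t :: cs).drop k.toNat = cs.drop (k.toNat - 1) := by
          have hko : k.toNat = (k.toNat - 1) + 1 := by omega
          rw [hko]; simp
        have h0 : (k - 0).toNat = k.toNat := by omega
        simp only [mainLoop, Bool.false_eq_true, if_false, skipInner_eq, h0, hd]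
        rw [key, hblock]
        simp

theorem solve_spec : Claim_equal_solve := by
  unfold Claim_equal_solve
  intro values l k _
  unfold Spec_solve solve solve_alt
  by_cases hv : values = []
  · simp [hv]
  · rw [if_neg hv, buildList_eq]
    by_cases hk : k ≤ 1
    · simp [alternatingReverse, hk, listToArray_eq]
    · rw [if_neg (by simp [hk, hv] : ¬(k ≤ 1 ∨ values = []))]
      have hk2 : 2 ≤ k := by omega
      have hs0 : (0 : Int) ≤ max (l - 1) 0 := le_max_right _ _
      have hsn : (max (l - 1) 0).toNat = (l - 1).toNat := by omega
      unfold alternatingReverse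
      rw [if_neg (by simp [hv, hk]), advanceLoop_eq]
      by_cases hadv : (l - 1).toNat ≤ values.length
      · rw [if_pos hadv]
        have key := mainLoop_eq_foldl values k hk2 (values.drop (max (l - 1) 0).toNat).length
          (max (l - 1) 0) true (values.take (max (l - 1) 0).toNat) hs0 (le_refl _)
        rw [hsn] at key
        rw [listToArray_eq, List.nil_append]
        dsimp only
        dsimp only at key
        rw [List.nil_append, key, PySem.List.slice_to values hs0, hsn]
      · rw [if_neg hadv, listToArray_eq, List.nil_append]
        dsimp only
        have hgt : (values.length : Int) ≤ max (l - 1) 0 := by omega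
        rw [pyRange_pos_eq_nil _ _ _ (by omega) hgt, PySem.List.slice_to values hs0]
        simp [List.take_of_length_le (by omega : values.length ≤ (max (l - 1) 0).toNat)]

-- ===== VERDICT (by name: the statement is the Claim_ definition above) =====
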